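-- pv_equiv track=rewrite | github.com/example42/saidata-gen | saidata_gen/fetcher/apk.py | _parse_apkindex
-- ===== SOURCE A (Python) =====
-- from typing import Dict, List, Optional, Set, Tuple
--
-- def _parse_apkindex(apkindex_content: str) -> Dict[str, Dict[str, any]]:
--     """
--     Parse an APKINDEX file from an APK repository.
--
--     Args:
--         apkindex_content: Content of the APKINDEX file.
--
--     Returns:
--         Dictionary mapping package names to their metadata.
--     """
--     result = {}
--     current_package = None
--     current_data = {}
--
--     for line in apkindex_content.splitlines():
--         if not line:
--             # Empty line indicates end of a package entry
--             if current_package and current_data: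
--                 result[current_package] = current_data
--             current_package = None
--             current_data = {}
--             continue
--
--         # Each line is a key-value pair
--         if ":" in line:
--             key, value = line.split(":", 1)
--             current_data[key] = value.strip()
--
--             # If this is the package name field, set the current package
--             if key == "P":
--                 current_package = value.strip()
--
--     # Add the last package (handle case where file doesn't end with empty line)
--     if current_package and current_data:
--         result[current_package] = current_data
--
--     return result
-- ===== SOURCE B (Python) =====
-- def _parse_apkindex(apkindex_content: str):
--     # Pass 1: group lines into record blocks separated by empty lines.
--     blocks = []
--     cur = []
--     for line in apkindex_content.splitlines():
--         if line:
--             cur.append(line)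
--         else:
--             if cur:
--                 blocks.append(cur)
--             cur = []
--     if cur:
--         blocks.append(cur)
--
--     # Pass 2: parse each block into a dict; keep it under its package name.
--     result = {}
--     for block in blocks:
--         data = {}
--         for line in block:
--             if ":" in line:
--                 key, value = line.split(":", 1)
--                 data[key] = value.strip()
--         name = data.get("P")
--         if name:
--             result[name] = data
--     return result
-- ===== Notes on version B (the rewrite author's own statement) =====
-- stated objective: alternative
-- what changed: Replaces A's single stateful pass (package-name sentinel plus mid-loop/post-loop flushes of mutable current_data) by an explicit group-then-parse decomposition: one pass partitions the lines into record blocks at empty lines, a second pass builds each block's dict and keys it by its package-name field.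
import Mathlib
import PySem

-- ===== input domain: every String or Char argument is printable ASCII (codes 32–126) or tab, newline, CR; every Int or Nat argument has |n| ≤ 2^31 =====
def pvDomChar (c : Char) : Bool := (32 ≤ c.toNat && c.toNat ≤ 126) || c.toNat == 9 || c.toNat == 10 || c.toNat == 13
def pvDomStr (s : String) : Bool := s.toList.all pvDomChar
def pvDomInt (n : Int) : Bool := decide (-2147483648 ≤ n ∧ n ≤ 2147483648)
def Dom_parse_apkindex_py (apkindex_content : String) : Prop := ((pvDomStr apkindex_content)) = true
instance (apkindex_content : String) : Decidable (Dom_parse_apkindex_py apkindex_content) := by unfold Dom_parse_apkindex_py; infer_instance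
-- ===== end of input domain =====

-- B replaces A's single stateful pass (sentinel + mid/post-loop flushes) by an explicit
-- group-lines-into-blocks pass followed by a parse-each-block pass (objective: alternative decomposition).

-- ===== PORT A =====
-- truthiness test 'current_package and current_data' (current_package : Option String)
def pvFlushOK (cp : Option String) (cd : PySem.Dict String String) : Bool :=
  (match cp with | some p => decide (p ≠ "") | none => false) && !cd.items.isEmpty

def pvStepA (st : PySem.Dict String (PySem.Dict String String) × Option String × PySem.Dict String String)
    (line : String) :
    PySem.Dict String (PySem.Dict String String) × Option String × PySem.Dict String String :=
  let (res, cp, cd) := st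
  if line = "" then
    (if pvFlushOK cp cd then res.insert (cp.getD "") cd else res, none, PySem.Dict.empty)
  else if PySem.Str.isIn ":" line then
    match PySem.Str.splitMax? line ":" 1 with
    | some (key :: value :: _) =>
        (res, if key = "P" then some (PySem.Str.strip value) else cp,
         cd.insert key (PySem.Str.strip value))
    | _ => (res, cp, cd)   -- unreachable: ':' is in line
  else (res, cp, cd)

def parse_apkindex_py (apkindex_content : String) : List (String × List (String × String)) :=
  let fin := (PySem.Str.splitlines apkindex_content).foldl pvStepA
    (PySem.Dict.empty, none, PySem.Dict.empty)
  let res := if pvFlushOK fin.2.1 fin.2.2 then fin.1.insert (fin.2.1.getD "") fin.2.2 else fin.1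
  res.items.map (fun kv => (kv.1, kv.2.items))

-- ===== PORT B =====
def pvStepG (st : List (List String) × List String) (line : String) :
    List (List String) × List String :=
  if line = "" then (if st.2.isEmpty then st.1 else st.1 ++ [st.2], [])
  else (st.1, st.2 ++ [line])

def pvParseLine (d : PySem.Dict String String) (line : String) : PySem.Dict String String :=
  if PySem.Str.isIn ":" line then
    match PySem.Str.splitMax? line ":" 1 with
    | some (key :: value :: _) => d.insert key (PySem.Str.strip value)
    | _ => d
  else d

def pvParseBlock (ls : List String) : PySem.Dict String String :=
  ls.foldl pvParseLine PySem.Dict.empty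

def pvInsB (res : PySem.Dict String (PySem.Dict String String)) (b : List String) :
    PySem.Dict String (PySem.Dict String String) :=
  let d := pvParseBlock b
  match d.get? "P" with
  | some name => if name ≠ "" then res.insert name d else res
  | none => res

def parse_apkindex_py_alt (apkindex_content : String) : List (String × List (String × String)) :=
  let g := (PySem.Str.splitlines apkindex_content).foldl pvStepG ([], [])
  let blocks := if g.2.isEmpty then g.1 else g.1 ++ [g.2]
  (blocks.foldl pvInsB PySem.Dict.empty).items.map (fun kv => (kv.1, kv.2.items))

-- ===== PRECONDITION & SPEC =====
def Spec_parse_apkindex_py (apkindex_content : String) (out : List (String × List (String × String))) : Prop := out = parse_apkindex_py_alt apkindex_content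
instance (apkindex_content : String) (out : List (String × List (String × String))) : Decidable (Spec_parse_apkindex_py apkindex_content out) := by unfold Spec_parse_apkindex_py; infer_instance

-- ===== CLAIM (what is proved, stated in full; the proofs are below) =====
def Claim_equal_parse_apkindex_py : Prop := ∀ (apkindex_content : String), Dom_parse_apkindex_py apkindex_content → Spec_parse_apkindex_py apkindex_content (parse_apkindex_py apkindex_content)

-- ===== LEMMAS AND PROOFS =====

-- recursive reference form of B's processing (proof-only)
def pvBrec (res : PySem.Dict String (PySem.Dict String String)) (cur : List String) :
    List String → PySem.Dict String (PySem.Dict String String)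
  | [] => pvInsB res cur
  | l :: t => if l = "" then pvBrec (pvInsB res cur) [] t else pvBrec res (cur ++ [l]) t

lemma pvInsB_nil (res : PySem.Dict String (PySem.Dict String String)) : pvInsB res [] = res := by
  simp [pvInsB, pvParseBlock, PySem.Dict.get?_empty]

-- A's flush with cp = (parse cur).get? "P" is exactly B's per-block insert
lemma pvFlush_eq (res : PySem.Dict String (PySem.Dict String String)) (cur : List String) :
    (if pvFlushOK ((pvParseBlock cur).get? "P") (pvParseBlock cur)
       then res.insert (((pvParseBlock cur).get? "P").getD "") (pvParseBlock cur) else res)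
    = pvInsB res cur := by
  unfold pvInsB
  cases h : (pvParseBlock cur).get? "P" with
  | none => simp [pvFlushOK, h]
  | some p =>
      have hne : (pvParseBlock cur).items ≠ [] := by
        intro hnil
        have hemp : pvParseBlock cur = PySem.Dict.empty := PySem.Dict.ext hnil
        rw [hemp, PySem.Dict.get?_empty] at h
        simp at h
      by_cases hp : p = "" <;> simp [pvFlushOK, h, hp, hne]

-- A's fold, started on a partially-read block, equals the recursive reference form
lemma pvA_eq_Brec (lines : List String) :
    ∀ (res : PySem.Dict String (PySem.Dict String String)) (cur : List String),
      (if pvFlushOK (lines.foldl pvStepA (res, (pvParseBlock cur).get? "P", pvParseBlock cur)).2.1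
            (lines.foldl pvStepA (res, (pvParseBlock cur).get? "P", pvParseBlock cur)).2.2
       then (lines.foldl pvStepA (res, (pvParseBlock cur).get? "P", pvParseBlock cur)).1.insert
              ((lines.foldl pvStepA (res, (pvParseBlock cur).get? "P", pvParseBlock cur)).2.1.getD "")
              (lines.foldl pvStepA (res, (pvParseBlock cur).get? "P", pvParseBlock cur)).2.2
       else (lines.foldl pvStepA (res, (pvParseBlock cur).get? "P", pvParseBlock cur)).1)
      = pvBrec res cur lines := by
  induction lines with
  | nil => intro res cur; simpa [pvBrec] using pvFlush_eq res cur
  | cons l t ih =>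
      intro res cur
      simp only [List.foldl_cons]
      by_cases hl : l = ""
      · subst hl
        rw [show pvStepA (res, (pvParseBlock cur).get? "P", pvParseBlock cur) ""
              = (pvInsB res cur, (pvParseBlock []).get? "P", pvParseBlock []) by
            simp only [pvStepA, if_pos (rfl : ("" : String) = "")]
            rw [pvFlush_eq]
            simp [pvParseBlock, PySem.Dict.get?_empty]]
        simp only [pvBrec, if_pos rfl]
        exact ih (pvInsB res cur) []
      · have hstep : pvStepA (res, (pvParseBlock cur).get? "P", pvParseBlock cur) l
            = (res, (pvParseBlock (cur ++ [l])).get? "P", pvParseBlock (cur ++ [l])) := by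
          have hblk : pvParseBlock (cur ++ [l]) = pvParseLine (pvParseBlock cur) l := by
            simp [pvParseBlock, List.foldl_append]
          simp only [pvStepA, if_neg hl]
          by_cases hin : PySem.Str.isIn ":" l = true
          · rw [if_pos hin]
            cases hm : PySem.Str.splitMax? l ":" 1 with
            | none =>
                have hb : pvParseBlock (cur ++ [l]) = pvParseBlock cur := by
                  rw [hblk]; unfold pvParseLine; rw [if_pos hin, hm]
                rw [hb]
            | some parts =>
                match parts with
                | [] =>
                    have hb : pvParseBlock (cur ++ [l]) = pvParseBlock cur := by
                      rw [hblk]; unfold pvParseLine; rw [if_pos hin, hm]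
                    rw [hb]
                | [k] =>
                    have hb : pvParseBlock (cur ++ [l]) = pvParseBlock cur := by
                      rw [hblk]; unfold pvParseLine; rw [if_pos hin, hm]
                    rw [hb]
                | k :: v :: rest =>
                    have hb : pvParseBlock (cur ++ [l])
                        = (pvParseBlock cur).insert k (PySem.Str.strip v) := by
                      rw [hblk]; unfold pvParseLine; rw [if_pos hin, hm]
                    rw [hb, PySem.Dict.get?_insert]
                    by_cases hk : k = "P"
                    · simp [hk]
                    · simp [hk, Ne.symm hk]
          · rw [if_neg hin]
            have hb : pvParseBlock (cur ++ [l]) = pvParseBlock cur := by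
              rw [hblk]; unfold pvParseLine; rw [if_neg hin]
            rw [hb]
        rw [hstep]
        simp only [pvBrec, if_neg hl]
        exact ih res (cur ++ [l])

-- the grouping fold's block accumulator is a prefix that can be factored out
lemma pvStepG_shift (lines : List String) :
    ∀ (bs : List (List String)) (cur : List String),
      lines.foldl pvStepG (bs, cur)
      = (bs ++ (lines.foldl pvStepG ([], cur)).1, (lines.foldl pvStepG ([], cur)).2) := by
  induction lines with
  | nil => intro bs cur; simp
  | cons l t ih =>
      intro bs cur
      simp only [List.foldl_cons]
      by_cases hl : l = ""
      · subst hl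
        by_cases hc : cur.isEmpty
        · simp only [pvStepG, reduceIte, hc]
          exact ih bs []
        · simp only [pvStepG, reduceIte, if_neg hc]
          rw [ih (bs ++ [cur]) [], ih ([] ++ [cur]) []]
          simp
      · simp only [pvStepG, if_neg hl]
        exact ih bs (cur ++ [l])

-- B's grouping fold + per-block insertion fold equals the recursive reference form
lemma pvB_eq_Brec (lines : List String) :
    ∀ (res : PySem.Dict String (PySem.Dict String String)) (cur : List String),
      (if (lines.foldl pvStepG ([], cur)).2.isEmpty
       then (lines.foldl pvStepG ([], cur)).1
       else (lines.foldl pvStepG ([], cur)).1 ++ [(lines.foldl pvStepG ([], cur)).2]).foldl pvInsB res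
      = pvBrec res cur lines := by
  induction lines with
  | nil =>
      intro res cur
      by_cases hc : cur.isEmpty
      · have hnil : cur = [] := by cases cur <;> simp_all
        simp [pvBrec, hc, hnil, pvInsB_nil]
      · simp [pvBrec, hc]
  | cons l t ih =>
      intro res cur
      simp only [List.foldl_cons]
      by_cases hl : l = ""
      · subst hl
        by_cases hc : cur.isEmpty = true
        · have hnil : cur = [] := by cases cur <;> simp_all
          subst hnil
          simp only [pvStepG, reduceIte]
          simp only [pvBrec, reduceIte, pvInsB_nil]
          exact ih res []
        · simp only [pvStepG, reduceIte, if_neg hc, List.nil_append]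
          rw [pvStepG_shift t [cur] []]
          simp only [pvBrec, reduceIte]
          have ih' := ih (pvInsB res cur) []
          by_cases he : (List.foldl pvStepG ([], []) t).2.isEmpty = true
          · simp only [he, reduceIte, List.singleton_append] at ih' ⊢
            rw [List.foldl_cons]
            exact ih'
          · simp only [he, if_neg he, Bool.false_eq_true, reduceIte, List.nil_append, List.cons_append] at ih' ⊢
            rw [List.foldl_cons]
            exact ih'
      · simp only [pvStepG, if_neg hl]
        simp only [pvBrec, if_neg hl]
        exact ih res (cur ++ [l])

-- ===== VERDICT (by name: the statement is the Claim_ definition above) =====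
theorem parse_apkindex_py_spec : Claim_equal_parse_apkindex_py := by
  intro s _
  show parse_apkindex_py s = parse_apkindex_py_alt s
  unfold parse_apkindex_py parse_apkindex_py_alt
  have hA := pvA_eq_Brec (PySem.Str.splitlines s) PySem.Dict.empty []
  have hB := pvB_eq_Brec (PySem.Str.splitlines s) PySem.Dict.empty []
  simp only [pvParseBlock, List.foldl_nil] at hA hB
  rw [show ((PySem.Dict.empty : PySem.Dict String String).get? "P") = none from rfl] at hA
  simp only []
  rw [hA, hB]
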